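-- pv_equiv track=rewrite | github.com/XXalchemist/Interview-Prep | Problem-6.py | SumOfTwo_2
-- ===== SOURCE A (Python) =====
-- def SumOfTwo_2(a,b,v):
--     differences = set()
--     for i in a :
--         difference = v - i
--         differences.add(difference)
--     for j in b:
--         if j in differences:
--             return True
--     return False
-- ===== SOURCE B (Python) =====
-- def SumOfTwo_2(a, b, v):
--     # alternative: plain nested scan, no auxiliary set is built
--     for i in a:
--         for j in b:
--             if j == v - i:
--                 return True
--     return False
-- ===== Notes on version B (the rewrite author's own statement) =====
-- stated objective: alternative
-- what changed: Replaces the precomputed difference set plus membership scan by a direct nested loop that returns on the first pair with j == v - i.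
import Mathlib
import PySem

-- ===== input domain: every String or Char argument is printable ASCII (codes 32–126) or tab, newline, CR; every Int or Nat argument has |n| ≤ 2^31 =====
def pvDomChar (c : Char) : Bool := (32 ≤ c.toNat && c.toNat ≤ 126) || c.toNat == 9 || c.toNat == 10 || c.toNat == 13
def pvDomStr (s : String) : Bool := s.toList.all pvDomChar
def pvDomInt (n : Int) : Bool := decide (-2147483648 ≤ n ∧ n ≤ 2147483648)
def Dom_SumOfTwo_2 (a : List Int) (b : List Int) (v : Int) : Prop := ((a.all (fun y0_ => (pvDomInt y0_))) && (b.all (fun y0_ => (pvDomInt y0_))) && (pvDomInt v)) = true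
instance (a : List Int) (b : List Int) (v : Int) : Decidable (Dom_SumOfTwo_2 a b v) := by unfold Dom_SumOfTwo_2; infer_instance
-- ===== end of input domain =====

-- B replaces A's precomputed difference set by a direct nested scan (alternative decomposition, same result).

-- ===== PORT A =====
-- 'for j in b: if j in differences: return True' / 'return False'
def pvScanA (diffs : PySem.Set Int) : List Int → Bool
  | [] => false
  | j :: rest => if PySem.Set.contains diffs j then true else pvScanA diffs rest

def SumOfTwo_2 (a : List Int) (b : List Int) (v : Int) : Bool :=
  let differences := a.foldl (fun s i => PySem.Set.add s (v - i)) PySem.Set.empty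
  pvScanA differences b

-- ===== PORT B =====
-- inner 'for j in b: if j == v - i: return True'
def pvInnerB (v i : Int) : List Int → Bool
  | [] => false
  | j :: rest => if j == v - i then true else pvInnerB v i rest

-- outer 'for i in a: …' / 'return False'
def pvOuterB (v : Int) (b : List Int) : List Int → Bool
  | [] => false
  | i :: rest => if pvInnerB v i b then true else pvOuterB v b rest

def SumOfTwo_2_alt (a : List Int) (b : List Int) (v : Int) : Bool :=
  pvOuterB v b a

-- ===== PRECONDITION & SPEC =====
def Spec_SumOfTwo_2 (a : List Int) (b : List Int) (v : Int) (out : Bool) : Prop := out = SumOfTwo_2_alt a b v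
instance (a : List Int) (b : List Int) (v : Int) (out : Bool) : Decidable (Spec_SumOfTwo_2 a b v out) := by unfold Spec_SumOfTwo_2; infer_instance

-- ===== CLAIM (what is proved, stated in full; the proofs are below) =====
def Claim_equal_SumOfTwo_2 : Prop := ∀ (a : List Int) (b : List Int) (v : Int), Dom_SumOfTwo_2 a b v → Spec_SumOfTwo_2 a b v (SumOfTwo_2 a b v)

-- ===== LEMMAS AND PROOFS =====
theorem pvScanA_iff (s : PySem.Set Int) (b : List Int) :
    pvScanA s b = true ↔ ∃ j ∈ b, j ∈ s := by
  induction b with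
  | nil => simp [pvScanA]
  | cons j rest ih =>
    simp only [pvScanA, PySem.Set.contains]
    by_cases h : j ∈ s <;> simp [h, ih]

theorem pvInnerB_iff (v i : Int) (b : List Int) :
    pvInnerB v i b = true ↔ ∃ j ∈ b, j = v - i := by
  induction b with
  | nil => simp [pvInnerB]
  | cons j rest ih =>
    simp only [pvInnerB]
    by_cases h : j = v - i
    · simp [h]
    · rw [if_neg (by simpa using h : ¬ (j == v - i) = true)]
      simp only [ih, List.mem_cons]
      constructor
      · rintro ⟨j', hj', he⟩; exact ⟨j', Or.inr hj', he⟩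
      · rintro ⟨j', hj', he⟩
        rcases hj' with rfl | hj'
        · exact absurd he h
        · exact ⟨j', hj', he⟩

theorem pvOuterB_iff (v : Int) (b a : List Int) :
    pvOuterB v b a = true ↔ ∃ i ∈ a, ∃ j ∈ b, j = v - i := by
  induction a with
  | nil => simp [pvOuterB]
  | cons i rest ih =>
    simp only [pvOuterB]
    by_cases h : pvInnerB v i b = true
    · rcases (pvInnerB_iff v i b).mp h with ⟨j, hj, he⟩
      rw [if_pos h]
      simp only [true_iff]
      exact ⟨i, List.mem_cons_self, j, hj, he⟩
    · have hni := (not_iff_not.mpr (pvInnerB_iff v i b)).mp h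
      rw [if_neg h]
      simp only [ih, List.mem_cons]
      constructor
      · rintro ⟨i', hi', hx⟩; exact ⟨i', Or.inr hi', hx⟩
      · rintro ⟨i', hi', j, hj, he⟩
        rcases hi' with rfl | h1
        · exact absurd ⟨j, hj, he⟩ hni
        · exact ⟨i', h1, j, hj, he⟩

theorem mem_fold_add (a : List Int) (v j : Int) :
    j ∈ a.foldl (fun s i => PySem.Set.add s (v - i)) PySem.Set.empty ↔ ∃ i ∈ a, j = v - i := by
  rw [← PySem.Set.update_map_eq_foldl_add, PySem.Set.update_empty, PySem.Set.mem_ofList, List.mem_map]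
  constructor
  · rintro ⟨i, hi, rfl⟩; exact ⟨i, hi, rfl⟩
  · rintro ⟨i, hi, rfl⟩; exact ⟨i, hi, rfl⟩

-- ===== VERDICT (by name: the statement is the Claim_ definition above) =====
theorem SumOfTwo_2_spec : Claim_equal_SumOfTwo_2 := by
  intro a b v _
  unfold Spec_SumOfTwo_2 SumOfTwo_2 SumOfTwo_2_alt
  rw [Bool.eq_iff_iff, pvScanA_iff, pvOuterB_iff]
  constructor
  · rintro ⟨j, hj, hjs⟩
    rcases (mem_fold_add a v j).mp hjs with ⟨i, hi, he⟩
    exact ⟨i, hi, j, hj, he⟩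
  · rintro ⟨i, hi, j, hj, he⟩
    exact ⟨j, hj, (mem_fold_add a v j).mpr ⟨i, hi, he⟩⟩
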